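-- pv_equiv track=rewrite | github.com/jennguyen1/bioinformatics_576 | gene_alignment/alignment/traceback.py | str_reformat
-- ===== SOURCE A (Python) =====
-- def str_reformat(s1, s2):
--     # removes leading & trailing spaces from first string
--     s1.strip()
--
--     # turn other string into a list - to replace spaces with '-'
--     s2 = list(s2)
--
--     # loop over the entire string
--     replace = False
--     for i in range(len(s2)):
--
--         # replace the space (between two sequences) to a gap
--         if s2[i] == " " and replace:
--             s2[i] = "-"
--
--         # set replace to true, once it reaches the first nonspace character, set replace to True so that all spaces
--         # after is replace with a gap. (The initial space characters are to align the second string to the first)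
--         if s2[i] != " ":
--             replace = True
--
--     # turn s1 into a list
--     s1 = list(s1)
--
--     # loop over entire string
--     for j in range(len(s1)):
--
--         # replace all spaces with gap spaces; leading and trailing spaces are removed prior to this
--         if s1[j] == " ":
--             s1[j] = "-"
--
--     # return both strings
--     return "".join(s1), "".join(s2)
-- ===== SOURCE B (Python) =====
-- def str_reformat(s1, s2):
--     # Keep s2's leading alignment spaces; turn every other space into a gap.
--     n = len(s2) - len(s2.lstrip(' '))
--     return s1.replace(' ', '-'), s2[:n] + s2[n:].replace(' ', '-')
-- ===== Notes on version B (the rewrite author's own statement) =====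
-- stated objective: simpler
-- what changed: Replaces A's two char-by-char loops with a mutable boolean flag by a boundary-locate-then-transform decomposition: compute the leading-space run length via lstrip(' '), keep that prefix, and use str.replace on the suffix and on s1.
import Mathlib
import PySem

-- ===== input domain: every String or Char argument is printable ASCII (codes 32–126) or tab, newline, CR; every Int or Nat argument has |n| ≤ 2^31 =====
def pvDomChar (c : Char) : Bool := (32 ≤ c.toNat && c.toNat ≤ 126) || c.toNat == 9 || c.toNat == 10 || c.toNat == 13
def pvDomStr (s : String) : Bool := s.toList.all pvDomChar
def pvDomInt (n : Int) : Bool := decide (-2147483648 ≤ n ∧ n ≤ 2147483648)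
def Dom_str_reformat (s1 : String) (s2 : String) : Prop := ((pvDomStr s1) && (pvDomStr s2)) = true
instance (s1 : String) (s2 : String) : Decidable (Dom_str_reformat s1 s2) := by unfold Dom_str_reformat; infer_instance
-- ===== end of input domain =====

-- B replaces A's two flag-driven char loops by locate-the-leading-space-run then str.replace; same values, no speed claim.

-- ===== PORT A =====
-- one loop step of A's first for-loop: maybe replace the char, then update the flag from the (possibly replaced) char
def pvStepA (st : List Char × Bool) (c : Char) : List Char × Bool :=
  let c' := if c == ' ' && st.2 then '-' else c
  (st.1 ++ [c'], st.2 || c' != ' ')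

def str_reformat (s1 : String) (s2 : String) : String × String :=
  let _ := PySem.Str.strip s1          -- A calls s1.strip() and discards the result
  let l2 := (s2.toList.foldl pvStepA ([], false)).1
  let l1 := s1.toList.map (fun c => if c == ' ' then '-' else c)  -- A's second loop: replace every space
  (String.ofList l1, String.ofList l2)

-- ===== PORT B =====
def str_reformat_alt (s1 : String) (s2 : String) : String × String :=
  let l2 := s2.toList
  let n : Nat := l2.length - (l2.dropWhile (· == ' ')).length   -- len(s2) - len(s2.lstrip(' ')); dropWhile is exact for lstrip(' ')
  -- s2[:n] / s2[n:] with 0 ≤ n ≤ len(s2): take/drop are exact here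
  (String.ofList (PySem.Chars.replace s1.toList [' '] ['-']),
   String.ofList (l2.take n ++ PySem.Chars.replace (l2.drop n) [' '] ['-']))

-- ===== PRECONDITION & SPEC =====
def Spec_str_reformat (s1 : String) (s2 : String) (out : String × String) : Prop := out = str_reformat_alt s1 s2
instance (s1 : String) (s2 : String) (out : String × String) : Decidable (Spec_str_reformat s1 s2 out) := by unfold Spec_str_reformat; infer_instance

-- ===== CLAIM (what is proved, stated in full; the proofs are below) =====
def Claim_equal_str_reformat : Prop := ∀ (s1 : String) (s2 : String), Dom_str_reformat s1 s2 → Spec_str_reformat s1 s2 (str_reformat s1 s2)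

-- ===== LEMMAS AND PROOFS =====

-- single-char replace is a map
theorem replace_go_single (fuel : Nat) : ∀ (l acc : List Char), l.length ≤ fuel →
    PySem.Chars.replace.go [' '] ['-'] fuel l acc
      = acc.reverse ++ l.map (fun c => if c == ' ' then '-' else c) := by
  induction fuel with
  | zero =>
    intro l acc h
    have hl : l = [] := List.eq_nil_of_length_eq_zero (Nat.le_zero.1 h)
    subst hl; simp [PySem.Chars.replace.go]
  | succ n ih =>
    intro l acc h
    cases l with
    | nil => simp [PySem.Chars.replace.go]
    | cons c t =>
      rw [PySem.Chars.replace.go]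
      by_cases hc : c = ' '
      · subst hc
        rw [if_pos (by simp [List.isPrefixOf])]
        rw [ih _ _ (by simpa using Nat.le_of_succ_le_succ h)]
        simp
      · rw [if_neg (by simp [List.isPrefixOf]; exact fun h' => hc h'.symm)]
        rw [ih _ _ (Nat.le_of_succ_le_succ h)]
        simp [hc]

theorem replace_single (l : List Char) :
    PySem.Chars.replace l [' '] ['-'] = l.map (fun c => if c == ' ' then '-' else c) := by
  rw [PySem.Chars.replace]
  rw [if_neg (by simp)]
  exact replace_go_single l.length l [] le_rfl

-- A's s2 loop with the flag already true maps every space to '-'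
theorem loopA_true : ∀ (l acc : List Char),
    l.foldl pvStepA (acc, true) = (acc ++ l.map (fun c => if c == ' ' then '-' else c), true) := by
  intro l
  induction l with
  | nil => simp
  | cons c t ih =>
    intro acc
    by_cases hc : c = ' ' <;> simp [pvStepA, hc, ih, List.foldl_cons]

-- A's s2 loop with the flag false keeps the leading space run and maps the rest
theorem loopA_false : ∀ (l acc : List Char),
    (l.foldl pvStepA (acc, false)).1
      = acc ++ l.takeWhile (· == ' ') ++ (l.dropWhile (· == ' ')).map (fun c => if c == ' ' then '-' else c) := by
  intro l
  induction l with
  | nil => simp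
  | cons c t ih =>
    intro acc
    by_cases hc : c = ' '
    · subst hc
      simp only [List.foldl_cons, pvStepA]
      simpa [List.takeWhile, List.dropWhile] using ih (acc ++ [' '])
    · simp only [List.foldl_cons, pvStepA, List.takeWhile, List.dropWhile]
      rw [if_neg (by simp), show (c == ' ') = false by simp [hc]]
      simp only [Bool.false_or]
      rw [show (c != ' ') = true by simp [hc], loopA_true]
      simp [hc]

theorem take_n_eq_takeWhile (l : List Char) :
    l.take (l.length - (l.dropWhile (· == ' ')).length) = l.takeWhile (· == ' ') := by
  rw [List.dropWhile_eq_drop_findIdx_not, List.takeWhile_eq_take_findIdx_not, List.length_drop]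
  have hk : List.findIdx (fun c => !(c == ' ')) l ≤ l.length := List.findIdx_le_length
  congr 1; omega

theorem drop_n_eq_dropWhile (l : List Char) :
    l.drop (l.length - (l.dropWhile (· == ' ')).length) = l.dropWhile (· == ' ') := by
  rw [List.dropWhile_eq_drop_findIdx_not, List.length_drop]
  have hk : List.findIdx (fun c => !(c == ' ')) l ≤ l.length := List.findIdx_le_length
  congr 1; omega

-- ===== VERDICT (by name: the statement is the Claim_ definition above) =====
theorem str_reformat_spec : Claim_equal_str_reformat := by
  intro s1 s2 _
  unfold Spec_str_reformat str_reformat str_reformat_alt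
  simp only [loopA_false, List.nil_append, replace_single, take_n_eq_takeWhile, drop_n_eq_dropWhile]
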